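-- pv_equiv track=rewrite | github.com/SnickerDoodlePop/Botmanteau | botmanteau.py | portmanteau
-- ===== SOURCE A (Python) =====
-- def is_vowel(char: str) -> bool:
--     return char.lower() in ('a', 'e', 'i', 'o', 'u')
--
-- def portmanteau(word: str, next_word: str) -> str:
--     newWord: str = ""
--
--     # append first word
--     for letter in word:
--         if is_vowel(letter):
--             break
--
--         else:
--             newWord += letter
--
--     # append second word
--     secondPartIdx: int = 0
--     for letter in next_word:
--         if not is_vowel(letter):
--             secondPartIdx += 1
--             continue
--
--         elif is_vowel(letter):
--             newWord += next_word[secondPartIdx:]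
--             return newWord
-- ===== SOURCE B (Python) =====
-- def _first_vowel(s):
--     """Index of the first vowel in s, or None."""
--     return next((i for i, c in enumerate(s) if c.lower() in "aeiou"), None)
--
-- def portmanteau(word, next_word):
--     wi = _first_vowel(word)
--     prefix = word if wi is None else word[:wi]
--     ni = _first_vowel(next_word)
--     if ni is None:
--         return None
--     return prefix + next_word[ni:]
-- ===== Notes on version B (the rewrite author's own statement) =====
-- stated objective: simpler
-- what changed: Replaced A's two character-accumulation loops (building the prefix char by char, then counting to the vowel) by one shared first-vowel-index helper plus two slices.
import Mathlib
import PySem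

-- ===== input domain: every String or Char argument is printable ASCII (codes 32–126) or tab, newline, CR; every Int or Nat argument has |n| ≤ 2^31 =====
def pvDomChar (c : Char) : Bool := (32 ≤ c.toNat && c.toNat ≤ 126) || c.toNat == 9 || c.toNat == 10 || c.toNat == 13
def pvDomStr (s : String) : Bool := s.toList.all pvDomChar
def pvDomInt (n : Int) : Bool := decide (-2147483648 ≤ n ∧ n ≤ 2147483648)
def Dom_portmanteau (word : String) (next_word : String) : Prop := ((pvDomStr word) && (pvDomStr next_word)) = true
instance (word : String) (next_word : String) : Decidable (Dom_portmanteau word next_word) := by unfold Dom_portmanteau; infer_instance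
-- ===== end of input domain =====

-- B replaces A's two character-accumulation loops by one shared first-vowel-index helper plus slicing (objective: simpler).

-- ===== PORT A =====
-- is_vowel: char.lower() in ('a','e','i','o','u')
def pvIsVowel (c : Char) : Bool := (['a','e','i','o','u'] : List Char).contains (PySem.Chars.lowerChar c)

-- first loop: accumulate letters of word until a vowel
def pvPrefixLoop : List Char → List Char → List Char
  | [], acc => acc
  | c :: rest, acc => if pvIsVowel c then acc else pvPrefixLoop rest (acc ++ [c])

-- second loop: count secondPartIdx until a vowel, then return newWord ++ next_word[secondPartIdx:]
def pvSecondLoop (next : List Char) (acc : List Char) : List Char → Int → Option (List Char)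
  | [], _ => none
  | c :: rest, idx =>
    if !pvIsVowel c then pvSecondLoop next acc rest (idx + 1)
    else some (acc ++ PySem.List.slice next (some idx) none)

def portmanteau (word : String) (next_word : String) : Option String :=
  let newWord := pvPrefixLoop word.toList []
  match pvSecondLoop next_word.toList newWord next_word.toList 0 with
  | none => none
  | some l => some (String.ofList l)

-- ===== PORT B =====
-- c.lower() in "aeiou"
def pvIsVowelB (c : Char) : Bool := (PySem.Chars.lowerChar c) ∈ ("aeiou".toList)

-- _first_vowel: index of the first vowel, or None (next over enumerate)
def pvFirstVowel (s : List Char) : Option Nat := s.findIdx? pvIsVowelB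

-- slices word[:wi] / next_word[ni:] with a nonnegative in-range index are exactly take/drop
def portmanteau_alt (word : String) (next_word : String) : Option String :=
  let w := word.toList
  let n := next_word.toList
  let pref := match pvFirstVowel w with
    | none => w
    | some wi => w.take wi
  match pvFirstVowel n with
  | none => none
  | some ni => some (String.ofList (pref ++ n.drop ni))

-- ===== PRECONDITION & SPEC =====
def Spec_portmanteau (word : String) (next_word : String) (out : Option String) : Prop := out = portmanteau_alt word next_word
instance (word : String) (next_word : String) (out : Option String) : Decidable (Spec_portmanteau word next_word out) := by unfold Spec_portmanteau; infer_instance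

-- ===== CLAIM (what is proved, stated in full; the proofs are below) =====
def Claim_equal_portmanteau : Prop := ∀ (word : String) (next_word : String), Dom_portmanteau word next_word → Spec_portmanteau word next_word (portmanteau word next_word)

-- ===== LEMMAS AND PROOFS =====

theorem pvIsVowel_eq (c : Char) : pvIsVowel c = pvIsVowelB c := by
  simp [pvIsVowel, pvIsVowelB]

theorem pvPrefixLoop_eq (l acc : List Char) :
    pvPrefixLoop l acc = acc ++ (match l.findIdx? pvIsVowelB with
      | none => l
      | some i => l.take i) := by
  induction l generalizing acc with
  | nil => simp [pvPrefixLoop]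
  | cons c rest ih =>
    simp only [pvPrefixLoop, List.findIdx?_cons, pvIsVowel_eq]
    by_cases h : pvIsVowelB c = true
    · simp [h]
    · simp only [Bool.not_eq_true] at h
      simp [h, ih, Option.map]
      cases rest.findIdx? pvIsVowelB <;> simp

theorem pvSecondLoop_eq (next acc : List Char) (l : List Char) (j : ℕ) :
    pvSecondLoop next acc l (j : Int) = (match l.findIdx? pvIsVowelB with
      | none => none
      | some i => some (acc ++ PySem.List.slice next (some ((j + i : ℕ) : Int)) none)) := by
  induction l generalizing j with
  | nil => simp [pvSecondLoop]
  | cons c rest ih =>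
    simp only [pvSecondLoop, List.findIdx?_cons, pvIsVowel_eq]
    by_cases h : pvIsVowelB c = true
    · simp [h]
    · simp only [Bool.not_eq_true] at h
      have : ((j : Int) + 1) = ((j + 1 : ℕ) : Int) := by push_cast; ring
      simp only [h, Bool.not_false, if_pos, this, ih]
      cases hr : rest.findIdx? pvIsVowelB <;> simp [Option.map]
      congr 2
      omega

theorem portmanteau_spec_aux (word next_word : String) :
    portmanteau word next_word = portmanteau_alt word next_word := by
  unfold portmanteau portmanteau_alt pvFirstVowel
  simp only [pvPrefixLoop_eq, List.nil_append,
    show ((0 : Int)) = ((0 : ℕ) : Int) from rfl, pvSecondLoop_eq]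
  cases word.toList.findIdx? pvIsVowelB <;>
    cases h : next_word.toList.findIdx? pvIsVowelB <;>
      simp_all [PySem.List.slice_from_natCast]

-- ===== VERDICT (by name: the statement is the Claim_ definition above) =====
theorem portmanteau_spec : Claim_equal_portmanteau := by
  intro word next_word _
  exact portmanteau_spec_aux word next_word
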